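-- pv_equiv track=rewrite | github.com/oskarthaeter/HistAug-PLISM | src/histaug/models/model_interface.py | _get_scorpion_rect_axes
-- ===== SOURCE A (Python) =====
-- _SCORPION_SOURCE_ORDER = ["AT2", "GT450", "P", "DP200", "P1000"]
--
-- _SCORPION_TARGET_ORDER = ["AT2", "GT450", "P"]
--
-- def _canonical_scanner_name(scanner: str) -> str:
--     """Normalize scanner aliases so SCORPION-focused filtering is robust."""
--     s = "".join(ch for ch in str(scanner).upper() if ch.isalnum())
--     alias_to_canonical = {
--         "AT2": "AT2",
--         "APERIOAT2": "AT2",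
--         "GT450": "GT450",
--         "APERIOGT450": "GT450",
--         "P": "P",
--         "PHILIPS": "P",
--         "ULTRAFASTSCANNER": "P",
--         "DP200": "DP200",
--         "VENTANADP200": "DP200",
--         "S210": "DP200",
--         "P1000": "P1000",
--         "3DHISTECHP1000": "P1000",
--         "HISTECHP1000": "P1000",
--         "S360": "P1000",
--     }
--     return alias_to_canonical.get(s, s)
--
-- def _get_scorpion_rect_axes(
--     names: list[str],
-- ) -> tuple[list[int], list[str], list[int], list[str]]:
--     """Return ordered row/col indices+labels for rectangular SCORPION heatmaps."""
--     canonical_to_idx: dict[str, int] = {}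
--     for i, name in enumerate(names):
--         canon = _canonical_scanner_name(name)
--         if canon not in canonical_to_idx:
--             canonical_to_idx[canon] = i
--
--     src_labels = [s for s in _SCORPION_SOURCE_ORDER if s in canonical_to_idx]
--     tgt_labels = [t for t in _SCORPION_TARGET_ORDER if t in canonical_to_idx]
--     src_idx = [canonical_to_idx[s] for s in src_labels]
--     tgt_idx = [canonical_to_idx[t] for t in tgt_labels]
--     return src_idx, src_labels, tgt_idx, tgt_labels
-- ===== SOURCE B (Python) =====
-- _SCORPION_SOURCE_ORDER = ["AT2", "GT450", "P", "DP200", "P1000"]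
--
-- _SCORPION_TARGET_ORDER = ["AT2", "GT450", "P"]
--
-- def _canonical_scanner_name(scanner: str) -> str:
--     """Normalize scanner aliases so SCORPION-focused filtering is robust."""
--     s = "".join(ch for ch in str(scanner).upper() if ch.isalnum())
--     alias_to_canonical = {
--         "AT2": "AT2",
--         "APERIOAT2": "AT2",
--         "GT450": "GT450",
--         "APERIOGT450": "GT450",
--         "P": "P",
--         "PHILIPS": "P",
--         "ULTRAFASTSCANNER": "P",
--         "DP200": "DP200",
--         "VENTANADP200": "DP200",
--         "S210": "DP200",
--         "P1000": "P1000",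
--         "3DHISTECHP1000": "P1000",
--         "HISTECHP1000": "P1000",
--         "S360": "P1000",
--     }
--     return alias_to_canonical.get(s, s)
--
-- def _first_canonical_index(label, names):
--     """First position in names whose canonical scanner name equals label, else None."""
--     i = 0
--     for name in names:
--         if _canonical_scanner_name(name) == label:
--             return i
--         i += 1
--     return None
--
-- def _get_scorpion_rect_axes(names):
--     """Return ordered row/col indices+labels for rectangular SCORPION heatmaps."""
--     src = [(lab, i) for lab in _SCORPION_SOURCE_ORDER
--            if (i := _first_canonical_index(lab, names)) is not None]
--     tgt = [(lab, i) for lab in _SCORPION_TARGET_ORDER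
--            if (i := _first_canonical_index(lab, names)) is not None]
--     return ([i for _, i in src], [lab for lab, _ in src],
--             [i for _, i in tgt], [lab for lab, _ in tgt])
-- ===== Notes on version B (the rewrite author's own statement) =====
-- stated objective: alternative
-- what changed: Drops the canonical-name-to-first-index dictionary: for each of the constant SCORPION order labels B directly scans names for the first position whose canonical scanner name equals that label, assembling the four lists from these targeted scans.
import Mathlib
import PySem

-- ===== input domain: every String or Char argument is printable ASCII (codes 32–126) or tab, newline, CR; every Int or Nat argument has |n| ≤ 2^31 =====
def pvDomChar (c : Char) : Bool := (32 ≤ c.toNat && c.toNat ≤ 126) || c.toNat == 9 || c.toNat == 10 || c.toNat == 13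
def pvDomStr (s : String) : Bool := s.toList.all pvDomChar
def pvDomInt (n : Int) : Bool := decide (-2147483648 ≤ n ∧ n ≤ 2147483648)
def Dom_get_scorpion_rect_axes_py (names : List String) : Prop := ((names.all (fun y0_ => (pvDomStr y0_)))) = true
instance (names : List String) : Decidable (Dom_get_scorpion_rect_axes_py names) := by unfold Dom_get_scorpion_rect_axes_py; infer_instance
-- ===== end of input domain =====

-- B replaces A's first-seen dictionary with a direct first-match scan per constant label (alternative decomposition, same cost).

-- ===== PORT A =====
-- shared helper: _canonical_scanner_name, identical code in both Pythons
def pvScorpionSourceOrder : List String := ["AT2", "GT450", "P", "DP200", "P1000"]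

def pvScorpionTargetOrder : List String := ["AT2", "GT450", "P"]

def canonicalScannerName (scanner : String) : String :=
  let s := String.ofList ((PySem.Str.upper scanner).toList.filter (fun ch => PySem.Chars.isalnum ch))
  let aliasToCanonical : PySem.Dict String String := PySem.Dict.ofList
    [("AT2", "AT2"), ("APERIOAT2", "AT2"), ("GT450", "GT450"), ("APERIOGT450", "GT450"),
     ("P", "P"), ("PHILIPS", "P"), ("ULTRAFASTSCANNER", "P"),
     ("DP200", "DP200"), ("VENTANADP200", "DP200"), ("S210", "DP200"),
     ("P1000", "P1000"), ("3DHISTECHP1000", "P1000"), ("HISTECHP1000", "P1000"), ("S360", "P1000")]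
  aliasToCanonical.getD s s

def get_scorpion_rect_axes_py (names : List String) : List Int × List String × List Int × List String :=
  let canonicalToIdx : PySem.Dict String Int :=
    (PySem.List.enumerate names 0).foldl (fun d p =>
      let canon := canonicalScannerName p.2
      if d.contains canon then d else d.insert canon p.1) PySem.Dict.empty
  let srcLabels := pvScorpionSourceOrder.filter (fun s => canonicalToIdx.contains s)
  let tgtLabels := pvScorpionTargetOrder.filter (fun t => canonicalToIdx.contains t)
  -- dict [] lookup: every filtered label is present, so getD's default is never taken
  let srcIdx := srcLabels.map (fun s => canonicalToIdx.getD s 0)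
  let tgtIdx := tgtLabels.map (fun t => canonicalToIdx.getD t 0)
  (srcIdx, srcLabels, tgtIdx, tgtLabels)

-- ===== PORT B =====
def firstCanonicalIndexAux (label : String) (names : List String) (i : Int) : Option Int :=
  match names with
  | [] => none
  | name :: rest =>
    if canonicalScannerName name = label then some i
    else firstCanonicalIndexAux label rest (i + 1)

def first_canonical_index (label : String) (names : List String) : Option Int :=
  firstCanonicalIndexAux label names 0

def get_scorpion_rect_axes_py_alt (names : List String) : List Int × List String × List Int × List String :=
  let src := pvScorpionSourceOrder.filterMap (fun lab =>
    (first_canonical_index lab names).map (fun i => (lab, i)))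
  let tgt := pvScorpionTargetOrder.filterMap (fun lab =>
    (first_canonical_index lab names).map (fun i => (lab, i)))
  (src.map (·.2), src.map (·.1), tgt.map (·.2), tgt.map (·.1))

-- ===== PRECONDITION & SPEC =====
def Spec_get_scorpion_rect_axes_py (names : List String) (out : List Int × List String × List Int × List String) : Prop := out = get_scorpion_rect_axes_py_alt names
instance (names : List String) (out : List Int × List String × List Int × List String) : Decidable (Spec_get_scorpion_rect_axes_py names out) := by unfold Spec_get_scorpion_rect_axes_py; infer_instance

-- ===== CLAIM (what is proved, stated in full; the proofs are below) =====
def Claim_equal_get_scorpion_rect_axes_py : Prop := ∀ (names : List String), Dom_get_scorpion_rect_axes_py names → Spec_get_scorpion_rect_axes_py names (get_scorpion_rect_axes_py names)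

-- ===== LEMMAS AND PROOFS =====

-- A's dict lookup after the whole fold equals: the accumulator's answer, else B's first-match scan.
theorem get?_fold_eq_firstIdx (names : List String) (s : String) (d0 : PySem.Dict String Int) (i0 : Int) :
    ((PySem.List.enumerate names i0).foldl (fun d p =>
      let canon := canonicalScannerName p.2
      if d.contains canon then d else d.insert canon p.1) d0).get? s
    = (d0.get? s).or (firstCanonicalIndexAux s names i0) := by
  induction names generalizing d0 i0 with
  | nil => simp [PySem.List.enumerate_nil, firstCanonicalIndexAux]
  | cons n rest ih =>
    rw [PySem.List.enumerate_cons]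
    simp only [List.foldl_cons]
    by_cases hc : canonicalScannerName n = s
    · by_cases hmem : d0.contains (canonicalScannerName n) = true
      · simp only [hmem, if_true]
        rw [ih]
        have hsome : (d0.get? s).isSome := by
          rw [← hc]
          rw [PySem.Dict.contains_eq_isSome_get?] at hmem
          exact hmem
        cases h : d0.get? s with
        | none => simp [h] at hsome
        | some v => simp [firstCanonicalIndexAux, hc]
      · simp only [hmem]
        simp only [Bool.not_eq_true] at hmem
        rw [if_neg (by simp)]
        rw [ih]
        have hnone : d0.get? s = none := by
          rw [← hc]
          rw [PySem.Dict.contains_eq_isSome_get?] at hmem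
          cases h : d0.get? (canonicalScannerName n) <;> simp [h] at hmem ⊢
        rw [hnone, hc, PySem.Dict.get?_insert_self]
        simp [firstCanonicalIndexAux, hc]
    · have hstep : ∀ d1 : PySem.Dict String Int,
          (if d0.contains (canonicalScannerName n) then d0
           else d0.insert (canonicalScannerName n) i0).get? s = d0.get? s := by
        intro _
        split
        · rfl
        · exact PySem.Dict.get?_insert_of_ne _ _ (fun h => hc h.symm)
      by_cases hmem : d0.contains (canonicalScannerName n) = true
      · simp only [hmem, if_true]
        rw [ih, firstCanonicalIndexAux, if_neg hc]
      · simp only [hmem]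
        rw [if_neg (by simp_all)]
        rw [ih, PySem.Dict.get?_insert_of_ne _ _ (fun h => hc h.symm)]
        rw [firstCanonicalIndexAux, if_neg hc]

theorem get?_final_dict (names : List String) (s : String) :
    ((PySem.List.enumerate names 0).foldl (fun d p =>
      let canon := canonicalScannerName p.2
      if d.contains canon then d else d.insert canon p.1) PySem.Dict.empty).get? s
    = first_canonical_index s names := by
  rw [get?_fold_eq_firstIdx, PySem.Dict.get?_empty, Option.none_or, first_canonical_index]

theorem filter_map_eq_filterMap (L : List String) (f : String → Option Int) :
    (L.filter (fun s => (f s).isSome)).map (fun s => (f s).getD 0)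
      = (L.filterMap (fun s => (f s).map (fun i => (s, i)))).map (·.2)
    ∧ L.filter (fun s => (f s).isSome)
      = (L.filterMap (fun s => (f s).map (fun i => (s, i)))).map (·.1) := by
  induction L with
  | nil => simp
  | cons x xs ih =>
    cases h : f x with
    | none => simpa [List.filter_cons, List.filterMap_cons, h] using ih
    | some v => simpa [List.filter_cons, List.filterMap_cons, h] using ih

-- ===== VERDICT (by name: the statement is the Claim_ definition above) =====
theorem get_scorpion_rect_axes_py_spec : Claim_equal_get_scorpion_rect_axes_py := by
  intro names _
  unfold Spec_get_scorpion_rect_axes_py get_scorpion_rect_axes_py get_scorpion_rect_axes_py_alt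
  simp only []
  have hkey : ∀ s, ((PySem.List.enumerate names 0).foldl (fun d p =>
      let canon := canonicalScannerName p.2
      if d.contains canon then d else d.insert canon p.1) PySem.Dict.empty).get? s
      = first_canonical_index s names := fun s => get?_final_dict names s
  have hcont : ∀ s, ((PySem.List.enumerate names 0).foldl (fun d p =>
      let canon := canonicalScannerName p.2
      if d.contains canon then d else d.insert canon p.1) PySem.Dict.empty).contains s
      = (first_canonical_index s names).isSome := by
    intro s
    rw [PySem.Dict.contains_eq_isSome_get?, hkey s]
  have hgetD : ∀ s, ((PySem.List.enumerate names 0).foldl (fun d p =>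
      let canon := canonicalScannerName p.2
      if d.contains canon then d else d.insert canon p.1) PySem.Dict.empty).getD s 0
      = (first_canonical_index s names).getD 0 := by
    intro s
    rw [PySem.Dict.getD_eq_get?_getD, hkey s]
  simp only [hcont, hgetD]
  have hs := filter_map_eq_filterMap pvScorpionSourceOrder (fun s => first_canonical_index s names)
  have ht := filter_map_eq_filterMap pvScorpionTargetOrder (fun s => first_canonical_index s names)
  exact Prod.ext (by simpa using hs.1) (Prod.ext (by simpa using hs.2)
    (Prod.ext (by simpa using ht.1) (by simpa using ht.2)))
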